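-- pv_equiv track=rewrite | github.com/tomershukhman/phishing-detector | url-detector-ml/feature_extractor.py | _calculate_max_consecutive_consonants
-- ===== SOURCE A (Python) =====
-- def _calculate_max_consecutive_consonants(text):
--     """Calculate maximum sequence of consecutive consonants in text"""
--     if not text:
--         return 0
--
--     # Define consonants
--     consonants = "bcdfghjklmnpqrstvwxyz"
--     text = text.lower()
--
--     max_consecutive = 0
--     current_consecutive = 0
--
--     for char in text:
--         if char in consonants:
--             current_consecutive += 1
--             max_consecutive = max(max_consecutive, current_consecutive)
--         else:
--             current_consecutive = 0
--
--     return max_consecutive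
-- ===== SOURCE B (Python) =====
-- _CONSONANTS = frozenset("bcdfghjklmnpqrstvwxyz")
--
--
-- def _calculate_max_consecutive_consonants(text):
--     """Max run of consecutive consonants: scan run-by-run, one max per run."""
--     if not text:
--         return 0
--     s = text.lower()
--     n = len(s)
--     best = 0
--     i = 0
--     while i < n:
--         if s[i] in _CONSONANTS:
--             j = i + 1
--             while j < n and s[j] in _CONSONANTS:
--                 j += 1
--             best = max(best, j - i)
--             i = j
--         else:
--             i += 1
--     return best
-- ===== Notes on version B (the rewrite author's own statement) =====
-- stated objective: alternative
-- what changed: Replaces A's interleaved per-character counter (current/max updated on every char) with a two-level run scanner: an outer loop that jumps from run to run and an inner loop that finds each maximal consonant run's end, doing one max per run instead of one per consonant.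
import Mathlib
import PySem

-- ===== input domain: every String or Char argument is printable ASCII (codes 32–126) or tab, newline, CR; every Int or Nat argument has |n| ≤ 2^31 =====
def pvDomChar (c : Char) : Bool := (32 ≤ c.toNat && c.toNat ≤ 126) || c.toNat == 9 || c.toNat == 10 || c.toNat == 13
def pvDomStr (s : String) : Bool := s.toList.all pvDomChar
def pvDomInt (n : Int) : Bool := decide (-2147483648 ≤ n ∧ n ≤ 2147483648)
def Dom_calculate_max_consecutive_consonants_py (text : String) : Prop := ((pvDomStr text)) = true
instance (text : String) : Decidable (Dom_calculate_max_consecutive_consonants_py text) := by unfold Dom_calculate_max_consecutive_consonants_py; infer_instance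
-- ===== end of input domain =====

-- B replaces A's per-character counter with an index-based run scanner (outer loop jumps
-- run to run, inner loop finds each run's end): a different traversal, same O(n) cost.

-- consonant test, shared char class of both Pythons ('char in "bcdfghjklmnpqrstvwxyz"')
def pvIsCons (c : Char) : Bool := "bcdfghjklmnpqrstvwxyz".toList.contains c

-- ===== PORT A =====
def calculate_max_consecutive_consonants_py (text : String) : Int :=
  if text = "" then 0
  else
    ((PySem.Str.lower text).toList.foldl
      (fun st c => if pvIsCons c then (max st.1 (st.2 + 1), st.2 + 1) else (st.1, (0 : Int)))
      ((0 : Int), (0 : Int))).1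

-- ===== PORT B =====
-- inner while: first index ≥ j that is past the end or not a consonant
def pvScanCons (l : List Char) (j : Nat) : Nat :=
  if h : j < l.length then (if pvIsCons l[j] then pvScanCons l (j + 1) else j) else j
termination_by l.length - j

theorem pvScanCons_ge (l : List Char) (j : Nat) : j ≤ pvScanCons l j := by
  unfold pvScanCons
  split
  · split
    · exact le_trans (Nat.le_succ j) (pvScanCons_ge l (j + 1))
    · exact le_refl j
  · exact le_refl j
termination_by l.length - j

-- outer while over i, carrying best
def pvMaxRunLoop (l : List Char) (best i : Nat) : Nat :=
  if h : i < l.length then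
    if pvIsCons l[i] then
      pvMaxRunLoop l (max best (pvScanCons l (i + 1) - i)) (pvScanCons l (i + 1))
    else pvMaxRunLoop l best (i + 1)
  else best
termination_by l.length - i
decreasing_by
  · have := pvScanCons_ge l (i + 1); omega
  · omega

def calculate_max_consecutive_consonants_py_alt (text : String) : Int :=
  if text = "" then 0
  else ((pvMaxRunLoop (PySem.Str.lower text).toList 0 0 : Nat) : Int)

-- ===== PRECONDITION & SPEC =====
def Spec_calculate_max_consecutive_consonants_py (text : String) (out : Int) : Prop := out = calculate_max_consecutive_consonants_py_alt text
instance (text : String) (out : Int) : Decidable (Spec_calculate_max_consecutive_consonants_py text out) := by unfold Spec_calculate_max_consecutive_consonants_py; infer_instance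

-- ===== CLAIM (what is proved, stated in full; the proofs are below) =====
def Claim_equal_calculate_max_consecutive_consonants_py : Prop := ∀ (text : String), Dom_calculate_max_consecutive_consonants_py text → Spec_calculate_max_consecutive_consonants_py text (calculate_max_consecutive_consonants_py text)

-- ===== LEMMAS AND PROOFS =====

-- reference value: max consonant-run length, by peeling one run at a time
def pvMaxRun : List Char → Nat
  | [] => 0
  | a :: t =>
    if pvIsCons a then
      max (1 + (t.takeWhile pvIsCons).length) (pvMaxRun (t.dropWhile pvIsCons))
    else pvMaxRun t
termination_by l => l.length
decreasing_by
  · have := List.length_dropWhile_le (p := pvIsCons) (l := t); simpa using Nat.lt_succ_of_le this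
  · simp

theorem pvMaxRun_skip (a : Char) (t : List Char) (h : pvIsCons a = false) :
    pvMaxRun (a :: t) = pvMaxRun t := by
  rw [pvMaxRun]; simp [h]

theorem pvMaxRun_eq (l : List Char) :
    pvMaxRun l = max (l.takeWhile pvIsCons).length (pvMaxRun (l.dropWhile pvIsCons)) := by
  cases l with
  | nil => simp [pvMaxRun]
  | cons a t =>
    by_cases h : pvIsCons a = true
    · rw [pvMaxRun]; simp only [h, if_true, List.takeWhile_cons, List.dropWhile_cons,
        List.length_cons]
      omega
    · have h' : pvIsCons a = false := by simpa using h
      simp [h', pvMaxRun_skip a t h']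

-- A's fold computes pvMaxRun (generalized over the carried state)
theorem foldA_eq (l : List Char) : ∀ (m c : Int), 0 ≤ c → c ≤ m →
    (l.foldl
      (fun st ch => if pvIsCons ch then (max st.1 (st.2 + 1), st.2 + 1) else (st.1, (0 : Int)))
      (m, c)).1
    = max m (max (c + ((l.takeWhile pvIsCons).length : Int)) ((pvMaxRun (l.dropWhile pvIsCons) : Nat) : Int)) := by
  induction l with
  | nil => intro m c h0 hcm; simp [pvMaxRun]; omega
  | cons a t ih =>
    intro m c h0 hcm
    by_cases h : pvIsCons a = true
    · have ihh := ih (max m (c + 1)) (c + 1) (by omega) (le_max_right _ _)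
      simp only [List.foldl_cons, h, if_true, List.takeWhile_cons, List.dropWhile_cons,
        List.length_cons]
      rw [ihh]
      push_cast
      omega
    · have h' : pvIsCons a = false := by simpa using h
      have ihh := ih m 0 le_rfl (le_trans h0 hcm)
      simp only [List.foldl_cons, h', Bool.false_eq_true, if_false, List.takeWhile_cons,
        List.dropWhile_cons, List.length_nil]
      rw [ihh, pvMaxRun_skip a t h', pvMaxRun_eq t]
      push_cast
      omega

-- dropWhile as a drop
theorem dropWhile_eq_drop (p : Char → Bool) (l : List Char) :
    l.dropWhile p = l.drop (l.takeWhile p).length := by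
  induction l with
  | nil => simp
  | cons a t ih =>
    by_cases h : p a = true
    · simp [h, ih]
    · have h' : p a = false := by simpa using h
      simp [h']

-- the inner while finds the end of the consonant run starting at j
theorem pvScanCons_eq (l : List Char) (j : Nat) :
    pvScanCons l j = j + ((l.drop j).takeWhile pvIsCons).length := by
  unfold pvScanCons
  split
  · rename_i h
    have hd : l.drop j = l[j] :: l.drop (j + 1) := (List.getElem_cons_drop h).symm
    by_cases hc : pvIsCons l[j] = true
    · rw [if_pos hc, pvScanCons_eq l (j + 1), hd, List.takeWhile_cons, if_pos hc]
      simp; omega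
    · have hc' : pvIsCons l[j] = false := by simpa using hc
      rw [if_neg (by simp [hc']), hd, List.takeWhile_cons, if_neg (by simp [hc'])]
      simp
  · rename_i h
    have : l.drop j = [] := List.drop_eq_nil_of_le (by omega)
    simp [this]
termination_by l.length - j

-- B's outer loop computes pvMaxRun of the remaining suffix
theorem pvMaxRunLoop_eq (l : List Char) : ∀ (i best : Nat),
    pvMaxRunLoop l best i = max best (pvMaxRun (l.drop i)) := by
  intro i
  induction hn : l.length - i using Nat.strong_induction_on generalizing i with
  | _ n ih =>
    intro best
    unfold pvMaxRunLoop
    split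
    · rename_i h
      have hd : l.drop i = l[i] :: l.drop (i + 1) := (List.getElem_cons_drop h).symm
      by_cases hc : pvIsCons l[i] = true
      · rw [if_pos hc]
        have hscan := pvScanCons_eq l (i + 1)
        have hge : i + 1 ≤ pvScanCons l (i + 1) := pvScanCons_ge l (i + 1)
        rw [ih (l.length - pvScanCons l (i + 1)) (by omega) (pvScanCons l (i + 1)) rfl]
        rw [hd]
        rw [pvMaxRun]
        simp only [hc, if_pos]
        have hrest : (l.drop (i + 1)).dropWhile pvIsCons = l.drop (pvScanCons l (i + 1)) := by
          rw [dropWhile_eq_drop, List.drop_drop]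
          congr 1
          omega
        rw [hrest]
        omega
      · have hc' : pvIsCons l[i] = false := by simpa using hc
        rw [if_neg (by simp [hc']), ih (l.length - (i + 1)) (by omega) (i + 1) rfl, hd,
          pvMaxRun_skip _ _ hc']
    · rename_i h
      have : l.drop i = [] := List.drop_eq_nil_of_le (by omega)
      simp [this, pvMaxRun]

-- ===== VERDICT (by name: the statement is the Claim_ definition above) =====
theorem calculate_max_consecutive_consonants_py_spec : Claim_equal_calculate_max_consecutive_consonants_py := by
  intro text _
  unfold Spec_calculate_max_consecutive_consonants_py
  unfold calculate_max_consecutive_consonants_py calculate_max_consecutive_consonants_py_alt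
  by_cases he : text = ""
  · simp [he]
  · rw [if_neg he, if_neg he]
    set l := (PySem.Str.lower text).toList with hl
    rw [foldA_eq l 0 0 le_rfl le_rfl, pvMaxRunLoop_eq l 0 0]
    have := pvMaxRun_eq l
    have hcast : ((pvMaxRun l : Nat) : Int)
        = max ((l.takeWhile pvIsCons).length : Int) ((pvMaxRun (l.dropWhile pvIsCons) : Nat) : Int) := by
      rw [this]; push_cast; omega
    simp only [List.drop_zero, Nat.zero_max]
    omega
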